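-- pv_equiv track=rewrite | github.com/LortieW/AoC2022 | day_8a/app.py | reversed_parse
-- ===== SOURCE A (Python) =====
-- def reversed_parse(block):
--     n = len(block)
--     results = [[True for x in range(n)] for y in range(n)]
--     for i in range(1, n - 1):
--         max_value = block[i][n - 1]
--         for j in reversed(range(1, n - 1)):
--             if block[i][j] <= max_value:
--                 results[i][j] = False
--             max_value = max(block[i][j], max_value)
--     return results
-- ===== SOURCE B (Python) =====
-- def reversed_parse(block):
--     n = len(block)
--     return [
--         [True] * n
--         if i == 0 or i == n - 1
--         else [True]
--         + [block[i][j] > max(block[i][j + 1 : n]) for j in range(1, n - 1)]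
--         + [True]
--         for i in range(n)
--     ]
-- ===== Notes on version B (the rewrite author's own statement) =====
-- stated objective: alternative
-- what changed: B builds the whole result as a comprehension, computing each interior cell directly as row[j] > max(row[j+1:n]) against the recomputed suffix maximum, instead of A's in-place mutation of an all-True grid threading a running maximum right-to-left.
-- outside the precondition, e.g. on reversed_parse([[1, 2, 3], [4, 5], [7, 8, 9]]): A raises IndexError, B raises
import Mathlib
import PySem

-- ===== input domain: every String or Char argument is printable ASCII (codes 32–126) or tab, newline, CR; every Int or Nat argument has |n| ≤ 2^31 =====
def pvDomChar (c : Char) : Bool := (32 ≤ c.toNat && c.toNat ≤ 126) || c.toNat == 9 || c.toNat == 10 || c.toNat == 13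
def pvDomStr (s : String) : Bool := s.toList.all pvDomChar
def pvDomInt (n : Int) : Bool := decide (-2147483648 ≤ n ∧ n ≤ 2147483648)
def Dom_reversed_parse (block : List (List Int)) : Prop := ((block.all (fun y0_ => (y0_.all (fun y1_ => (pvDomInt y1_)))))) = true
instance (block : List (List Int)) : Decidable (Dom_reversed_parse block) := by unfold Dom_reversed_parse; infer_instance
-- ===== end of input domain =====

-- B replaces A's threaded right-to-left running maximum by a direct per-cell
-- comparison against the maximum of the row's suffix slice (objective: alternative).

-- ===== PORT A =====
def reversed_parse (block : List (List Int)) : List (List Bool) :=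
  let n : Int := block.length
  let results : List (List Bool) :=
    (PySem.List.pyRange 0 n 1).map (fun _ => (PySem.List.pyRange 0 n 1).map (fun _ => true))
  (PySem.List.pyRange 1 (n - 1) 1).foldl (fun results i =>
    let max0 : Int := PySem.List.pyGetD (PySem.List.pyGetD block i []) (n - 1) 0
    ((PySem.List.pyRange 1 (n - 1) 1).reverse.foldl
      (fun (st : List (List Bool) × Int) j =>
        let results := st.1
        let max_value := st.2
        let results :=
          if PySem.List.pyGetD (PySem.List.pyGetD block i []) j 0 ≤ max_value then
            PySem.List.pySetD results i
              (PySem.List.pySetD (PySem.List.pyGetD results i []) j false)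
          else results
        (results, max (PySem.List.pyGetD (PySem.List.pyGetD block i []) j 0) max_value))
      (results, max0)).1) results

-- ===== PORT B =====
def reversed_parse_alt (block : List (List Int)) : List (List Bool) :=
  let n : Int := block.length
  (PySem.List.pyRange 0 n 1).map (fun i =>
    if i = 0 ∨ i = n - 1 then PySem.List.pyRepeat [true] n
    else
      [true] ++
        (PySem.List.pyRange 1 (n - 1) 1).map (fun j =>
          decide (PySem.List.pyGetD (PySem.List.pyGetD block i []) j 0 >
            (PySem.List.max?
              (PySem.List.slice (PySem.List.pyGetD block i []) (some (j + 1)) (some n))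
              (fun y => y)).getD 0)) ++
      [true])

-- ===== PRECONDITION & SPEC =====
-- A (and B) index interior rows up to column n-1 and raise IndexError on shorter
-- interior rows; Pre_ requires every interior row to have at least n entries.
def Pre_reversed_parse (block : List (List Int)) : Prop :=
  ∀ row ∈ (block.drop 1).dropLast, block.length ≤ row.length
instance (block : List (List Int)) : Decidable (Pre_reversed_parse block) := by
  unfold Pre_reversed_parse; infer_instance
def pvWitness_reversed_parse : List (List Int) :=
  [[3, 0, 3, 7, 3], [2, 5, 5, 1, 2], [6, 5, 3, 3, 2], [3, 3, 5, 4, 9], [3, 5, 3, 9, 0]]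
def Spec_reversed_parse (block : List (List Int)) (out : List (List Bool)) : Prop := out = reversed_parse_alt block
instance (block : List (List Int)) (out : List (List Bool)) : Decidable (Spec_reversed_parse block out) := by unfold Spec_reversed_parse; infer_instance

-- ===== CLAIM (what is proved, stated in full; the proofs are below) =====
def Claim_equal_reversed_parse : Prop := ∀ (block : List (List Int)), Dom_reversed_parse block → Pre_reversed_parse block → Spec_reversed_parse block (reversed_parse block)

-- ===== LEMMAS AND PROOFS =====

-- Helper abbreviations for the proofs (the ports above do not use them).

/-- Suffix maximum of `row` over indices `t … n-1` (0 when empty). -/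
def pvMsuf (row : List Int) (n t : Nat) : Int := (((row.drop t).take (n - t)).max?).getD 0

/-- One step of A's inner loop, acting on the row being modified. -/
def pvRowStep (row : List Int) (st : List Bool × Int) (j : Int) : List Bool × Int :=
  (if PySem.List.pyGetD row j 0 ≤ st.2 then PySem.List.pySetD st.1 j false else st.1,
   max (PySem.List.pyGetD row j 0) st.2)

theorem pv_foldl_max_shift (l : List Int) : ∀ a b : Int, l.foldl max (max a b) = max a (l.foldl max b) := by
  induction l with
  | nil => intro a b; rfl
  | cons x t ih =>
    intro a b
    simp only [List.foldl_cons]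
    rw [max_assoc, ih]

theorem pv_foldl_max_eq (l : List Int) : ∀ a : Int, l.foldl max a = (l.max?).elim a (max a) := by
  induction l with
  | nil => intro a; rfl
  | cons x t ih =>
    intro a
    simp only [List.foldl_cons, List.max?_cons, Option.elim_some]
    rw [max_comm a x, pv_foldl_max_shift, ih a]
    cases t.max? with
    | none => exact max_comm x a
    | some m => exact max_left_comm x a m

theorem pv_pymax_eq (l : List Int) : PySem.List.max? l (fun y => y) = l.max? := by
  cases l with
  | nil => simp [PySem.List.max?_eq_none_iff]
  | cons x t =>
    rw [PySem.List.max?_id_cons, List.max?_cons, pv_foldl_max_eq]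

theorem pv_seg_cons (row : List Int) (n t : Nat) (ht : t < n) (hlen : n ≤ row.length) :
    (row.drop t).take (n - t) = row[t]'(by omega) :: (row.drop (t+1)).take (n - (t+1)) := by
  rw [List.drop_eq_getElem_cons (by omega)]
  rw [show n - t = (n - (t+1)) + 1 by omega]
  rfl

theorem pv_Msuf_last (row : List Int) (n : Nat) (hn : 1 ≤ n) (hlen : n ≤ row.length) :
    pvMsuf row n (n-1) = row.getD (n-1) 0 := by
  unfold pvMsuf
  rw [pv_seg_cons row n (n-1) (by omega) hlen]
  rw [show n - (n-1+1) = 0 by omega]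
  simp [List.getD, List.getElem?_eq_getElem (show n - 1 < row.length by omega)]

theorem pv_Msuf_rec (row : List Int) (n t : Nat) (ht1 : t + 1 ≤ n - 1) (hlen : n ≤ row.length) :
    pvMsuf row n t = max (row.getD t 0) (pvMsuf row n (t+1)) := by
  unfold pvMsuf
  rw [pv_seg_cons row n t (by omega) hlen]
  rw [pv_seg_cons row n (t+1) (by omega) hlen]
  rw [List.max?_cons]
  have hgd : row.getD t 0 = row[t]'(by omega) := by
    simp [List.getD, List.getElem?_eq_getElem (show t < row.length by omega)]
  rw [List.max?_cons]
  simp [List.getD, List.getElem?_eq_getElem (show t < row.length by omega)]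

/-- A's inner loop over `reversed(range(1, t))`, acting on a single row. -/
theorem pv_rowFold (row : List Int) (n : Nat) (hlen : n ≤ row.length) :
    ∀ t : Nat, 1 ≤ t → t ≤ n - 1 → ∀ r : List Bool, r.length = n →
      (((PySem.List.pyRange 1 (t : Int) 1).reverse.foldl (pvRowStep row) (r, pvMsuf row n t)).1.length = n) ∧
      (∀ p : Nat, p < n →
        ((PySem.List.pyRange 1 (t : Int) 1).reverse.foldl (pvRowStep row) (r, pvMsuf row n t)).1[p]? =
          if 1 ≤ p ∧ p < t ∧ row.getD p 0 ≤ pvMsuf row n (p+1) then some false else r[p]?) := by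
  intro t ht1
  induction t, ht1 using Nat.le_induction with
  | base =>
    intro _ r hr
    rw [PySem.List.pyRange_one_eq_nil (by omega)]
    simp only [List.reverse_nil, List.foldl_nil]
    refine ⟨hr, ?_⟩
    intro p hp
    have hno : ¬ (1 ≤ p ∧ p < 1 ∧ row.getD p 0 ≤ pvMsuf row n (p+1)) := by omega
    rw [if_neg hno]
  | succ t ht ih =>
    intro htn r hr
    have hrange : PySem.List.pyRange 1 ((t:Int)+1) 1 = PySem.List.pyRange 1 (t:Int) 1 ++ [(t:Int)] := by
      exact PySem.List.pyRange_one_succ_right (by omega)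
    have hcast : ((t:Int)+1) = ((t+1 : Nat) : Int) := by push_cast; ring
    rw [← hcast, hrange]
    simp only [List.reverse_append, List.reverse_cons, List.reverse_nil, List.nil_append,
      List.singleton_append, List.foldl_cons]
    -- the first processed index is j = t
    have hstep : pvRowStep row (r, pvMsuf row n (t+1)) (t:Int) =
        ((if row.getD t 0 ≤ pvMsuf row n (t+1) then r.set t false else r), pvMsuf row n t) := by
      unfold pvRowStep
      simp only [PySem.List.pyGetD_natCast, PySem.List.pySetD_natCast, List.getD_eq_getElem?_getD]
      rw [pv_Msuf_rec row n t (by omega) hlen]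
      simp [List.getD_eq_getElem?_getD, max_comm]
    rw [hstep]
    set r' : List Bool := if row.getD t 0 ≤ pvMsuf row n (t+1) then r.set t false else r with hr'
    have hr'len : r'.length = n := by
      rw [hr']; split <;> simp [hr]
    obtain ⟨ihlen, ihval⟩ := ih (by omega) r' hr'len
    refine ⟨ihlen, ?_⟩
    intro p hp
    rw [ihval p hp]
    have hr'p : r'[p]? = if p = t ∧ row.getD p 0 ≤ pvMsuf row n (p+1) then some false else r[p]? := by
      rw [hr']
      by_cases hpt : p = t
      · subst hpt
        by_cases hc : row.getD p 0 ≤ pvMsuf row n (p+1)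
        · rw [if_pos hc, if_pos ⟨rfl, hc⟩,
            List.getElem?_eq_getElem (by rw [List.length_set, hr]; exact hp)]
          simp
        · rw [if_neg hc, if_neg (fun h => hc h.2)]
      · have hne : ¬ (p = t ∧ row.getD p 0 ≤ pvMsuf row n (p+1)) := fun h => hpt h.1
        rw [if_neg hne]
        split
        · exact List.getElem?_set_ne (fun h => hpt h.symm)
        · rfl
    rw [hr'p]
    by_cases h1 : 1 ≤ p ∧ p < t ∧ row.getD p 0 ≤ pvMsuf row n (p+1)
    · rw [if_pos h1, if_pos ⟨h1.1, by omega, h1.2.2⟩]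
    · rw [if_neg h1]
      by_cases h2 : p = t ∧ row.getD p 0 ≤ pvMsuf row n (p+1)
      · rw [if_pos h2, if_pos ⟨by omega, by omega, h2.2⟩]
      · rw [if_neg h2, if_neg ?_]
        intro h
        rcases h with ⟨hp1, hpt1, hC⟩
        by_cases hq : p = t
        · exact h2 ⟨hq, hC⟩
        · exact h1 ⟨hp1, by omega, hC⟩

/-- One step of A's inner loop, acting on the whole matrix (row `i` is updated). -/
def pvMatStep (block : List (List Int)) (i : Int) (st : List (List Bool) × Int) (j : Int) :
    List (List Bool) × Int :=
  (if PySem.List.pyGetD (PySem.List.pyGetD block i []) j 0 ≤ st.2 then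
      PySem.List.pySetD st.1 i (PySem.List.pySetD (PySem.List.pyGetD st.1 i []) j false)
    else st.1,
   max (PySem.List.pyGetD (PySem.List.pyGetD block i []) j 0) st.2)

theorem pv_matFold (block : List (List Int)) (k : Nat) (rs : List (List Bool)) (hk : k < rs.length) :
    ∀ (js : List Int) (st : List Bool) (m : Int),
      js.foldl (pvMatStep block (k:Int)) (rs.set k st, m) =
        (rs.set k ((js.foldl (pvRowStep (block.getD k [])) (st, m)).1),
         (js.foldl (pvRowStep (block.getD k [])) (st, m)).2) := by
  intro js
  induction js with
  | nil => intro st m; rfl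
  | cons j js ih =>
    intro st m
    have hgd : (rs.set k st).getD k [] = st := by
      rw [List.getD_eq_getElem?_getD,
        List.getElem?_eq_getElem (by rw [List.length_set]; exact hk)]
      simp
    have hmat : pvMatStep block (k:Int) (rs.set k st, m) j =
        (rs.set k ((pvRowStep (block.getD k []) (st, m) j).1),
         (pvRowStep (block.getD k []) (st, m) j).2) := by
      simp only [pvMatStep, pvRowStep, PySem.List.pyGetD_natCast, PySem.List.pySetD_natCast, hgd]
      split
      · rw [List.set_set]
      · rfl
    simp only [List.foldl_cons, hmat, ih]

/-- The outer loop body of A (as it appears in `reversed_parse`). -/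
def pvOutStep (block : List (List Int)) (rs : List (List Bool)) (i : Int) : List (List Bool) :=
  ((PySem.List.pyRange 1 ((block.length : Int) - 1) 1).reverse.foldl (pvMatStep block i)
    (rs, PySem.List.pyGetD (PySem.List.pyGetD block i []) ((block.length : Int) - 1) 0)).1

/-- The row A leaves at interior index `k`, starting from row `st`. -/
def pvFinalRow (block : List (List Int)) (k : Nat) (st : List Bool) : List Bool :=
  ((PySem.List.pyRange 1 ((block.length : Int) - 1) 1).reverse.foldl
    (pvRowStep (block.getD k []))
    (st, PySem.List.pyGetD (block.getD k []) ((block.length : Int) - 1) 0)).1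

theorem pv_outStep_set (block : List (List Int)) (k : Nat) (rs : List (List Bool))
    (hk : k < rs.length) :
    pvOutStep block rs (k:Int) = rs.set k (pvFinalRow block k (rs.getD k [])) := by
  have hset : rs.set k (rs.getD k []) = rs := by
    rw [List.getD_eq_getElem?_getD, List.getElem?_eq_getElem hk]
    exact List.set_getElem_self hk
  have h := pv_matFold block k rs hk
    ((PySem.List.pyRange 1 ((block.length : Int) - 1) 1).reverse) (rs.getD k [])
    (PySem.List.pyGetD (block.getD k []) ((block.length : Int) - 1) 0)
  unfold pvOutStep pvFinalRow
  rw [PySem.List.pyGetD_natCast (xs := block)]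
  conv_lhs => rw [← hset]
  rw [h]

theorem pv_outerFold (block : List (List Int)) :
    ∀ (c a : Nat) (rs : List (List Bool)), block.length - 1 - a = c → 1 ≤ a →
      rs.length = block.length →
      (((PySem.List.pyRange (a:Int) ((block.length : Int) - 1) 1).foldl (pvOutStep block) rs).length
          = block.length) ∧
      (∀ k : Nat, k < block.length →
        ((PySem.List.pyRange (a:Int) ((block.length : Int) - 1) 1).foldl (pvOutStep block) rs)[k]? =
          if a ≤ k ∧ k + 1 < block.length then some (pvFinalRow block k (rs.getD k []))
          else rs[k]?) := by
  intro c
  induction c with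
  | zero =>
    intro a rs hc ha hlen
    rw [PySem.List.pyRange_one_eq_nil (by omega)]
    simp only [List.foldl_nil]
    refine ⟨hlen, ?_⟩
    intro k hkn
    rw [if_neg (by omega)]
  | succ c ih =>
    intro a rs hc ha hlen
    have han : a < block.length - 1 := by omega
    rw [PySem.List.pyRange_one_cons (by omega)]
    simp only [List.foldl_cons]
    rw [pv_outStep_set block a rs (by omega)]
    set rs' := rs.set a (pvFinalRow block a (rs.getD a [])) with hrs'
    have hlen' : rs'.length = block.length := by rw [hrs', List.length_set, hlen]
    have hcast : ((a:Int) + 1) = ((a + 1 : Nat) : Int) := by push_cast; ring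
    rw [hcast]
    obtain ⟨ihlen, ihval⟩ := ih (a+1) rs' (by omega) (by omega) hlen'
    refine ⟨ihlen, ?_⟩
    intro k hkn
    rw [ihval k hkn]
    by_cases h1 : a + 1 ≤ k ∧ k + 1 < block.length
    · rw [if_pos h1, if_pos ⟨by omega, h1.2⟩]
      have : rs'.getD k [] = rs.getD k [] := by
        rw [hrs', List.getD_eq_getElem?_getD, List.getD_eq_getElem?_getD,
          List.getElem?_set_ne (by omega)]
        rfl
      rw [this]

    · rw [if_neg h1]
      by_cases hka : k = a
      · subst hka
        rw [if_pos ⟨le_refl k, by omega⟩, hrs',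
          List.getElem?_eq_getElem (by rw [List.length_set]; omega)]
        simp
      · rw [if_neg (by omega), hrs', List.getElem?_set_ne (by omega)]


theorem pv_const_map {α : Type} (N : Nat) (x : α) :
    (PySem.List.pyRange 0 (N:Int) 1).map (fun _ => x) = List.replicate N x := by
  rw [List.map_const', PySem.List.length_pyRange_one]
  simp

/-- A written as a fold of `pvOutStep` over the outer range. -/
theorem pv_A_eq (block : List (List Int)) :
    reversed_parse block =
      (PySem.List.pyRange 1 ((block.length : Int) - 1) 1).foldl (pvOutStep block)
        ((PySem.List.pyRange 0 (block.length : Int) 1).map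
          (fun _ => (PySem.List.pyRange 0 (block.length : Int) 1).map (fun _ => true))) := rfl

/-- A's interior row equals B's directly computed row. -/
theorem pv_interior_row (block : List (List Int)) (k : Nat) (hk1 : 1 ≤ k)
    (hk2 : k + 1 < block.length)
    (hrow : block.length ≤ (block.getD k []).length) :
    pvFinalRow block k (List.replicate block.length true) =
      [true] ++
        (PySem.List.pyRange 1 ((block.length : Int) - 1) 1).map (fun j =>
          decide (PySem.List.pyGetD (block.getD k []) j 0 >
            (PySem.List.max?
              (PySem.List.slice (block.getD k []) (some (j + 1)) (some (block.length : Int)))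
              (fun y => y)).getD 0)) ++
      [true] := by
  set N := block.length with hN
  set row := block.getD k [] with hrowdef
  clear_value N row
  have hN3 : 3 ≤ N := by omega
  have hLHS : pvFinalRow block k (List.replicate N true) =
      ((PySem.List.pyRange 1 ((N - 1 : Nat) : Int) 1).reverse.foldl (pvRowStep row)
        (List.replicate N true, pvMsuf row N (N - 1))).1 := by
    unfold pvFinalRow
    rw [← hN, ← hrowdef]
    rw [show ((N:Int) - 1) = ((N - 1 : Nat) : Int) by omega]
    rw [PySem.List.pyGetD_natCast,
      show row.getD (N-1) 0 = pvMsuf row N (N-1) from (pv_Msuf_last row N (by omega) hrow).symm]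
  obtain ⟨hlen, hval⟩ := pv_rowFold row N hrow (N - 1) (by omega) (le_refl _)
    (List.replicate N true) (by simp)
  set L := (PySem.List.pyRange 1 ((N : Int) - 1) 1).map (fun j =>
    decide (PySem.List.pyGetD row j 0 >
      (PySem.List.max? (PySem.List.slice row (some (j + 1)) (some (N : Int)))
        (fun y => y)).getD 0)) with hL
  have hLlen : L.length = N - 2 := by
    rw [hL, List.length_map, PySem.List.length_pyRange_one]; omega
  apply List.ext_getElem?
  intro p
  by_cases hp : p < N
  · rw [hLHS, hval p hp]
    have hlen1 : ([true] ++ L).length = N - 1 := by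
      rw [List.length_append, hLlen]; simp; omega
    by_cases hplast : p = N - 1
    · rw [if_neg (by omega), List.getElem?_append_right (by omega), hlen1]
      subst hplast
      simp only [show N - 1 - (N - 1) = 0 by omega, List.getElem?_cons_zero,
        List.getElem?_replicate]
      rw [if_pos (by omega)]
    · rw [List.getElem?_append_left (by omega)]
      rcases Nat.eq_zero_or_pos p with hp0 | hp1
      · subst hp0
        rw [if_neg (by omega), List.getElem?_append_left (by simp)]
        simp [hp]
      · rw [List.getElem?_append_right (l₁ := [true]) (by simp; omega)]
        simp only [List.length_cons, List.length_nil]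
        -- interior column: 1 ≤ p ≤ N - 2
        have hpi : p ≤ N - 2 := by omega
        rw [hL, List.getElem?_map, PySem.List.getElem?_pyRange_one,
          show ((N:Int) - 1 - 1).toNat = N - 2 from by omega]
        rw [if_pos (show p - 1 < N - 2 by omega)]
        have hcast : (1 : Int) + ((p - 1 : Nat) : Int) = ((p : Nat) : Int) := by omega
        rw [hcast]
        simp only [Option.map_some]
        have hslice : PySem.List.slice row (some ((p:Int) + 1)) (some (N : Int)) =
            (row.drop (p+1)).take (N - (p+1)) := by
          rw [show ((p:Int) + 1) = (((p+1 : Nat)) : Int) by omega, PySem.List.slice_natCast]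
        rw [PySem.List.pyGetD_natCast, hslice, pv_pymax_eq]
        have hMeq : (((row.drop (p+1)).take (N - (p+1))).max?).getD 0 = pvMsuf row N (p+1) := rfl
        rw [hMeq]
        by_cases hC : row.getD p 0 ≤ pvMsuf row N (p+1)
        · rw [if_pos ⟨by omega, by omega, hC⟩]
          rw [List.getD_eq_getElem?_getD] at hC
          simp [not_lt.mpr hC]
        · rw [if_neg (fun h => hC h.2.2)]
          rw [List.getD_eq_getElem?_getD] at hC
          have h2 := lt_of_not_ge hC
          simp [h2, hp]
  · have h1 : (pvFinalRow block k (List.replicate N true)).length ≤ p := by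
      rw [hLHS] at *
      omega
    rw [List.getElem?_eq_none h1, List.getElem?_eq_none]
    rw [List.length_append, List.length_append, hLlen]
    simp only [List.length_singleton]
    omega


theorem pv_pre_row (block : List (List Int)) (hpre : Pre_reversed_parse block)
    (k : Nat) (hk1 : 1 ≤ k) (hk2 : k + 1 < block.length) :
    block.length ≤ (block.getD k []).length := by
  have hk' : k - 1 < ((block.drop 1).dropLast).length := by
    rw [List.length_dropLast, List.length_drop]; omega
  have hget : ((block.drop 1).dropLast)[k-1]'hk' = block.getD k [] := by
    rw [List.getElem_dropLast, List.getElem_drop,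
      List.getD_eq_getElem?_getD, List.getElem?_eq_getElem (by omega)]
    simp only [Option.getD_some]
    congr 1
    omega
  have hmem : block.getD k [] ∈ (block.drop 1).dropLast := by
    rw [← hget]; exact List.getElem_mem hk'
  exact hpre _ hmem


-- ===== VERDICT (by name: the statement is the Claim_ definition above) =====
theorem reversed_parse_spec : Claim_equal_reversed_parse := by
  intro block _ hpre
  unfold Spec_reversed_parse
  rcases Nat.eq_zero_or_pos block.length with h0 | hposN
  · have hb : block = [] := List.eq_nil_of_length_eq_zero h0
    subst hb
    rfl
  · rw [pv_A_eq block]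
    simp only [pv_const_map]
    obtain ⟨hAlen, hAval⟩ := pv_outerFold block (block.length - 1 - 1) 1
      (List.replicate block.length (List.replicate block.length true)) rfl (le_refl 1)
      (by simp)
    simp only [Nat.cast_one] at hAlen hAval
    show _ = reversed_parse_alt block
    unfold reversed_parse_alt
    apply List.ext_getElem?
    intro k
    by_cases hk : k < block.length
    · rw [hAval k hk, PySem.List.getElem?_map_pyRange_zero _ block.length k hk]
      by_cases hki : 1 ≤ k ∧ k + 1 < block.length
      · -- interior row
        rw [if_pos hki,
          show (List.replicate block.length (List.replicate block.length true)).getD k [] =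
              List.replicate block.length true from by
            rw [List.getD_eq_getElem?_getD, List.getElem?_replicate, if_pos hk]; rfl]
        rw [pv_interior_row block k hki.1 hki.2 (pv_pre_row block hpre k hki.1 hki.2)]
        rw [if_neg (show ¬ ((k:Int) = 0 ∨ (k:Int) = (block.length:Int) - 1) by
          rintro (h | h) <;> omega)]
        simp only [PySem.List.pyGetD_natCast]
      · -- border row (k = 0 or k = block.length - 1)
        rw [if_neg hki,
          List.getElem?_replicate, if_pos hk,
          if_pos (show (k:Int) = 0 ∨ (k:Int) = (block.length:Int) - 1 by omega),
          PySem.List.pyRepeat_singleton]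
        simp
    · rw [List.getElem?_eq_none (by omega),
        List.getElem?_eq_none (by
          rw [List.length_map, PySem.List.length_pyRange_one]
          omega)]
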